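-- pv_equiv track=rewrite | github.com/Jeremylaby/ASD_2023 | Python/egz5a/egzP5a.py | inwestor
-- ===== SOURCE A (Python) =====
-- def f(a,b,DP,T):
--     if a==b:
--         return T[b]
--     if DP[a][b]!=-1:
--         return DP[a][b]
--     DP[a][b]=min(T[b],f(a,b-1,DP,T))
--     return DP[a][b]
--
-- def inwestor ( T ):
--     n=len(T)
--     maks=0
--     DP=[[-1]*n for _ in range(n)]
--     for i in range(n):
--         for j in range(i,n):
--             maks=max(maks,(j-i+1)*f(i,j,DP,T))
--
--     return maks
-- ===== SOURCE B (Python) =====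
-- def inwestor(T):
--     best = 0
--     n = len(T)
--     for i in range(n):
--         m = T[i]
--         for j in range(i, n):
--             if T[j] < m:
--                 m = T[j]
--             p = (j - i + 1) * m
--             if p > best:
--                 best = p
--     return best
-- ===== Notes on version B (the rewrite author's own statement) =====
-- stated objective: faster
-- what changed: The memoized recursion f with an n-by-n DP table of subarray minima is replaced by a streaming minimum per left endpoint: one pass over right endpoints keeps the running minimum and the best product, so the table and the recursion disappear.
import Mathlib
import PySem

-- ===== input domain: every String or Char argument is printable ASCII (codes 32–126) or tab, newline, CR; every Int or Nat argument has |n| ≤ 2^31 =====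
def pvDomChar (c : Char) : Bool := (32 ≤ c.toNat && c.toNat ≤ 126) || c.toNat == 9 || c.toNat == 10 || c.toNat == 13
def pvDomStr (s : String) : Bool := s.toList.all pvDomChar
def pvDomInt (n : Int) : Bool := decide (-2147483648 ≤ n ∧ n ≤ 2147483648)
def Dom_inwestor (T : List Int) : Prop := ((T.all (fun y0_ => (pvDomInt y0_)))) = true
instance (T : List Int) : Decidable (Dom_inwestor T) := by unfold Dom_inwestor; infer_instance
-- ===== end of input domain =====

-- B replaces A's memoized recursion over an n×n DP table by a running minimum per
-- left endpoint (no recursion, no table); objective: faster by a constant factor.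

-- ===== PORT A =====
-- DP table access/update (Python DP[a][b] read and DP[a][b]=v; indices used by A are always in range)
def dpGet (DP : List (List Int)) (a b : Nat) : Int := (DP.getD a []).getD b (-1)
def dpSet (DP : List (List Int)) (a b : Nat) (v : Int) : List (List Int) :=
  DP.set a ((DP.getD a []).set b v)

-- Python f(a,b,DP,T): memoized min of T[a..b]; returns the value and the updated table.
-- Structural recursion on b (Python's b-1); the b=0 case is reached by A only with a=0,=
-- where Python's a==b branch returns T[b].
def fA (T : List Int) (a : Nat) : Nat → List (List Int) → Int × List (List Int)
  | 0, DP => (T.getD 0 0, DP)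
  | b + 1, DP =>
    if a = b + 1 then (T.getD (b + 1) 0, DP)
    else if dpGet DP a (b + 1) ≠ -1 then (dpGet DP a (b + 1), DP)
    else
      let r := fA T a b DP
      let v := min (T.getD (b + 1) 0) r.1
      (v, dpSet r.2 a (b + 1) v)

def inwestor (T : List Int) : Int :=
  let n := T.length
  let DP0 := List.replicate n (List.replicate n (-1 : Int))
  (((List.range n).foldl (fun (st : Int × List (List Int)) i =>
      (List.range' i (n - i)).foldl (fun (st : Int × List (List Int)) j =>
          let r := fA T i j st.2
          (max st.1 (((j : Int) - (i : Int) + 1) * r.1), r.2)) st)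
    (0, DP0))).1

-- ===== PORT B =====
def inwestor_alt (T : List Int) : Int :=
  let n := T.length
  (List.range n).foldl (fun best i =>
    ((List.range' i (n - i)).foldl (fun (st : Int × Int) j =>
        let m := if T.getD j 0 < st.1 then T.getD j 0 else st.1
        let p := ((j : Int) - (i : Int) + 1) * m
        (m, if st.2 < p then p else st.2)) (T.getD i 0, best)).2) 0

-- ===== PRECONDITION & SPEC =====
def Spec_inwestor (T : List Int) (out : Int) : Prop := out = inwestor_alt T
instance (T : List Int) (out : Int) : Decidable (Spec_inwestor T out) := by unfold Spec_inwestor; infer_instance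

-- ===== CLAIM (what is proved, stated in full; the proofs are below) =====
def Claim_equal_inwestor : Prop := ∀ (T : List Int), Dom_inwestor T → Spec_inwestor T (inwestor T)

-- ===== LEMMAS AND PROOFS =====

def minTo (T : List Int) (a : Nat) : Nat → Int
  | 0 => T.getD a 0
  | b + 1 => if b + 1 ≤ a then T.getD a 0 else min (minTo T a b) (T.getD (b + 1) 0)

def Valid (T : List Int) (DP : List (List Int)) : Prop :=
  ∀ a b, dpGet DP a b ≠ -1 → dpGet DP a b = minTo T a b

def g (T : List Int) (i : Nat) (best : Int) (j : Nat) : Int :=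
  max best (((j : Int) - (i : Int) + 1) * minTo T i j)

lemma minTo_self (T : List Int) (a : Nat) : minTo T a a = T.getD a 0 := by
  cases a <;> simp [minTo]

lemma minTo_succ (T : List Int) (a b : Nat) (h : a ≤ b) :
    minTo T a (b + 1) = min (minTo T a b) (T.getD (b + 1) 0) := by
  simp only [minTo]
  rw [if_neg (by omega)]

lemma getD_set_self (l : List Int) (i : Nat) (v d : Int) (h : i < l.length) :
    (l.set i v).getD i d = v := by
  simp [List.getD_eq_getElem?_getD, List.getElem?_set_self h]

lemma getD_set_self' (l : List (List Int)) (i : Nat) (v d : List Int) (h : i < l.length) :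
    (l.set i v).getD i d = v := by
  simp [List.getD_eq_getElem?_getD, List.getElem?_set_self h]

lemma getD_set_ne (l : List Int) (i j : Nat) (v d : Int) (h : i ≠ j) :
    (l.set i v).getD j d = l.getD j d := by
  simp [List.getD_eq_getElem?_getD, List.getElem?_set_ne h]

lemma getD_set_ne' (l : List (List Int)) (i j : Nat) (v d : List Int) (h : i ≠ j) :
    (l.set i v).getD j d = l.getD j d := by
  simp [List.getD_eq_getElem?_getD, List.getElem?_set_ne h]

lemma valid_init (T : List Int) (n : Nat) :
    Valid T (List.replicate n (List.replicate n (-1 : Int))) := by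
  intro a b h
  exfalso; apply h
  have houter : (List.replicate n (List.replicate n (-1 : Int))).getD a []
      = if a < n then List.replicate n (-1 : Int) else [] := by
    rw [List.getD_eq_getElem?_getD, List.getElem?_replicate]; split <;> rfl
  rw [dpGet, houter]
  split
  · rw [List.getD_eq_getElem?_getD, List.getElem?_replicate]; split <;> rfl
  · rfl

lemma dpGet_dpSet (DP : List (List Int)) (a b : Nat) (v : Int) (a' b' : Nat) :
    dpGet (dpSet DP a b v) a' b' = dpGet DP a' b' ∨
    (a' = a ∧ b' = b ∧ dpGet (dpSet DP a b v) a' b' = v) := by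
  by_cases ha : a = a'
  · subst ha
    by_cases hl : a < DP.length
    · by_cases hb : b = b'
      · subst hb
        by_cases hr : b < (DP.getD a []).length
        · right
          refine ⟨rfl, rfl, ?_⟩
          rw [dpGet, dpSet, getD_set_self' _ _ _ _ hl, getD_set_self _ _ _ _ hr]
        · left
          rw [dpGet, dpSet, getD_set_self' _ _ _ _ hl,
            List.set_eq_of_length_le (Nat.le_of_not_lt hr)]
          rfl
      · left
        rw [dpGet, dpSet, getD_set_self' _ _ _ _ hl, getD_set_ne _ _ _ _ _ hb]
        rfl
    · left
      rw [dpGet, dpSet, List.set_eq_of_length_le (Nat.le_of_not_lt hl)]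
      rfl
  · left
    rw [dpGet, dpSet, getD_set_ne' _ _ _ _ _ ha]
    rfl

lemma fA_correct (T : List Int) (a : Nat) :
    ∀ (b : Nat) (DP : List (List Int)), a ≤ b → Valid T DP →
      (fA T a b DP).1 = minTo T a b ∧ Valid T (fA T a b DP).2 := by
  intro b
  induction b with
  | zero =>
    intro DP hab hV
    interval_cases a
    exact ⟨by simp [fA, minTo], hV⟩
  | succ b ih =>
    intro DP hab hV
    by_cases hEq : a = b + 1
    · subst hEq
      constructor
      · simp [fA, minTo]
      · simpa [fA] using hV
    · have hab' : a ≤ b := by omega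
      by_cases hMemo : dpGet DP a (b + 1) ≠ -1
      · refine ⟨?_, ?_⟩
        · simp only [fA, if_neg hEq, if_pos hMemo]
          exact hV a (b + 1) hMemo
        · simpa [fA, if_neg hEq, if_pos hMemo] using hV
      · obtain ⟨h1, h2⟩ := ih DP hab' hV
        have hmin : min (T.getD (b + 1) 0) (fA T a b DP).1 = minTo T a (b + 1) := by
          rw [h1, minTo_succ T a b hab', min_comm]
        refine ⟨?_, ?_⟩
        · simp only [fA, if_neg hEq, if_neg hMemo]
          exact hmin
        · simp only [fA, if_neg hEq, if_neg hMemo]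
          intro a' b' hne
          rcases dpGet_dpSet (fA T a b DP).2 a (b + 1)
              (min (T.getD (b + 1) 0) (fA T a b DP).1) a' b' with h | ⟨rfl, rfl, hv⟩
          · rw [h] at hne ⊢; exact h2 a' b' hne
          · rw [hv, hmin]

lemma innerA (T : List Int) (i : Nat) :
    ∀ (js : List Nat), (∀ j ∈ js, i ≤ j) → ∀ (maks : Int) (DP : List (List Int)), Valid T DP →
      ((js.foldl (fun (st : Int × List (List Int)) j =>
          let r := fA T i j st.2
          (max st.1 (((j : Int) - (i : Int) + 1) * r.1), r.2)) (maks, DP)).1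
        = js.foldl (g T i) maks)
      ∧ Valid T ((js.foldl (fun (st : Int × List (List Int)) j =>
          let r := fA T i j st.2
          (max st.1 (((j : Int) - (i : Int) + 1) * r.1), r.2)) (maks, DP)).2) := by
  intro js
  induction js with
  | nil => intro _ maks DP hV; exact ⟨rfl, hV⟩
  | cons j rest ih =>
    intro hmem maks DP hV
    have hij : i ≤ j := hmem j (by simp)
    obtain ⟨hf1, hf2⟩ := fA_correct T i j DP hij hV
    simp only [List.foldl_cons]
    rw [hf1,
      show max maks (((j : Int) - (i : Int) + 1) * minTo T i j) = g T i maks j from rfl]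
    exact ih (fun j' hj' => hmem j' (by simp [hj'])) (g T i maks j) (fA T i j DP).2 hf2

lemma outerA (T : List Int) :
    ∀ (is : List Nat) (maks : Int) (DP : List (List Int)), Valid T DP →
      ((is.foldl (fun (st : Int × List (List Int)) i =>
          (List.range' i (T.length - i)).foldl (fun (st : Int × List (List Int)) j =>
            let r := fA T i j st.2
            (max st.1 (((j : Int) - (i : Int) + 1) * r.1), r.2)) st) (maks, DP)).1
        = is.foldl (fun best i => (List.range' i (T.length - i)).foldl (g T i) best) maks) := by
  intro is
  induction is with
  | nil => intros; rfl
  | cons i rest ih =>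
    intro maks DP hV
    simp only [List.foldl_cons]
    have hmem : ∀ j ∈ List.range' i (T.length - i), i ≤ j :=
      fun j hj => (List.mem_range'_1.mp hj).1
    obtain ⟨h1, h2⟩ := innerA T i (List.range' i (T.length - i)) hmem maks DP hV
    rw [← Prod.mk.eta (p := (List.range' i (T.length - i)).foldl _ (maks, DP))]
    rw [ih _ _ h2, h1]

lemma innerB (T : List Int) (i : Nat) :
    ∀ (k j : Nat) (best : Int), i ≤ j →
      (((List.range' (j + 1) k).foldl (fun (st : Int × Int) j =>
          let m := if T.getD j 0 < st.1 then T.getD j 0 else st.1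
          let p := ((j : Int) - (i : Int) + 1) * m
          (m, if st.2 < p then p else st.2)) (minTo T i j, best)).2
        = (List.range' (j + 1) k).foldl (g T i) best) := by
  intro k
  induction k with
  | zero => intros; rfl
  | succ k ih =>
    intro j best hij
    rw [List.range'_succ]
    simp only [List.foldl_cons]
    have hm : (if T.getD (j + 1) 0 < minTo T i j then T.getD (j + 1) 0 else minTo T i j)
        = minTo T i (j + 1) := by
      rw [minTo_succ T i j hij, min_def]
      split_ifs <;> omega
    rw [hm]
    have hbest : (if best < (((j + 1 : Nat) : Int) - (i : Int) + 1) * minTo T i (j + 1)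
        then (((j + 1 : Nat) : Int) - (i : Int) + 1) * minTo T i (j + 1) else best)
        = g T i best (j + 1) := by
      rw [g, max_def]
      split_ifs <;> omega
    rw [hbest]
    exact ih (j + 1) (g T i best (j + 1)) (by omega)


lemma innerB_full (T : List Int) (i : Nat) (best : Int) :
    (((List.range' i (T.length - i)).foldl (fun (st : Int × Int) j =>
        let m := if T.getD j 0 < st.1 then T.getD j 0 else st.1
        let p := ((j : Int) - (i : Int) + 1) * m
        (m, if st.2 < p then p else st.2)) (T.getD i 0, best)).2
      = (List.range' i (T.length - i)).foldl (g T i) best) := by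
  cases hk : T.length - i with
  | zero => rfl
  | succ k =>
    rw [List.range'_succ]
    simp only [List.foldl_cons]
    have hm : (if T.getD i 0 < T.getD i 0 then T.getD i 0 else T.getD i 0) = minTo T i i := by
      rw [minTo_self]; split <;> rfl
    rw [hm]
    have hbest : (if best < ((i : Int) - (i : Int) + 1) * minTo T i i
        then ((i : Int) - (i : Int) + 1) * minTo T i i else best) = g T i best i := by
      rw [g, max_def]
      split_ifs <;> omega
    rw [hbest]
    exact innerB T i k i (g T i best i) (le_refl i)

lemma A_eq_pure (T : List Int) :
    inwestor T = (List.range T.length).foldl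
      (fun best i => (List.range' i (T.length - i)).foldl (g T i) best) 0 :=
  outerA T (List.range T.length) 0
    (List.replicate T.length (List.replicate T.length (-1 : Int))) (valid_init T T.length)

lemma B_eq_pure (T : List Int) :
    inwestor_alt T = (List.range T.length).foldl
      (fun best i => (List.range' i (T.length - i)).foldl (g T i) best) 0 := by
  show (List.range T.length).foldl (fun best i =>
      (((List.range' i (T.length - i)).foldl (fun (st : Int × Int) j =>
        let m := if T.getD j 0 < st.1 then T.getD j 0 else st.1
        let p := ((j : Int) - (i : Int) + 1) * m
        (m, if st.2 < p then p else st.2)) (T.getD i 0, best)).2)) 0 = _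
  rw [funext fun best => funext fun i => innerB_full T i best]

-- ===== VERDICT (by name: the statement is the Claim_ definition above) =====
theorem inwestor_spec : Claim_equal_inwestor := by
  intro T _
  unfold Spec_inwestor
  rw [A_eq_pure, B_eq_pure]
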